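-- pv_equiv track=rewrite | github.com/xiongdong57/AdventofCode2021 | day05.py | gen_line_points
-- ===== SOURCE A (Python) =====
-- def gen_line_points(x1, y1, x2, y2, diagonal_line=False):
--     points = []
--     x_min = min(x1, x2)
--     x_max = max(x1, x2)
--     y_min = min(y1, y2)
--     y_max = max(y1, y2)
--     if x1 == x2:
--         for y in range(y_min, y_max + 1):
--             points.append((x1, y))
--     elif y1 == y2:
--         for x in range(x_min, x_max + 1):
--             points.append((x, y1))
--     elif diagonal_line:
--         ascending = ((x1 == x_min and y1 == y_min) or
--                      (x2 == x_min and y2 == y_min))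
--         for x in range(x_min, x_max + 1):
--             if ascending:
--                 points.append((x, y_min + (x - x_min)))
--             else:
--                 points.append((x, y_max - (x - x_min)))
--     return points
-- ===== SOURCE B (Python) =====
-- def gen_line_points(x1, y1, x2, y2, diagonal_line=False):
--     def seg(x, y, dx, dy, n):
--         # n+1 points starting at (x, y), stepping (dx, dy); built by halving
--         if n == 0:
--             return [(x, y)]
--         h = n // 2
--         return seg(x, y, dx, dy, h) + \
--             seg(x + (h + 1) * dx, y + (h + 1) * dy, dx, dy, n - h - 1)
--
--     if x1 == x2:
--         return seg(x1, min(y1, y2), 0, 1, abs(y2 - y1))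
--     if y1 == y2 or diagonal_line:
--         (a, p), (b, q) = sorted([(x1, y1), (x2, y2)])
--         return seg(a, p, 1, (q > p) - (q < p), b - a)
--     return []
-- ===== Notes on version B (the rewrite author's own statement) =====
-- stated objective: alternative
-- what changed: Replaces A's three branch-specific linear append loops with a single recursive divide-and-conquer point generator: each branch is reduced to a start point, a unit step and a count, and the segment is built by halving the count and concatenating the two recursively generated halves.
import Mathlib
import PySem

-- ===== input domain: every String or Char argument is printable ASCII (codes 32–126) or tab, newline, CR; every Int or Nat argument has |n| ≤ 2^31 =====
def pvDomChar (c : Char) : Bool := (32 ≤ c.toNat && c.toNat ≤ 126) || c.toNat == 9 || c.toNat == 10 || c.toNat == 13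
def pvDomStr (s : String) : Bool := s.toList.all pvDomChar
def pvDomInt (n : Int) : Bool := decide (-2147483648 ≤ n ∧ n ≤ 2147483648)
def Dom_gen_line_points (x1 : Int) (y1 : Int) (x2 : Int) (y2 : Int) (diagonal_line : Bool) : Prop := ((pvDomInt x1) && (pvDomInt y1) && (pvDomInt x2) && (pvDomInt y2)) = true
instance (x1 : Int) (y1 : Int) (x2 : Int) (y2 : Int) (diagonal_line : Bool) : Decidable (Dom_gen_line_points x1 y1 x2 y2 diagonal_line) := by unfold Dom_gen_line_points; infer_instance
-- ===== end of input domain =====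

-- ===== PORT A =====
-- B replaces A's per-branch append loops with a recursive divide-and-conquer segment builder; return values only.
def gen_line_points (x1 : Int) (y1 : Int) (x2 : Int) (y2 : Int) (diagonal_line : Bool) : List (Int × Int) :=
  let x_min := min x1 x2
  let x_max := max x1 x2
  let y_min := min y1 y2
  let y_max := max y1 y2
  if x1 = x2 then
    (PySem.List.pyRange y_min (y_max + 1) 1).foldl (fun pts y => pts ++ [(x1, y)]) []
  else if y1 = y2 then
    (PySem.List.pyRange x_min (x_max + 1) 1).foldl (fun pts x => pts ++ [(x, y1)]) []
  else if diagonal_line then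
    let ascending := (x1 == x_min && y1 == y_min) || (x2 == x_min && y2 == y_min)
    (PySem.List.pyRange x_min (x_max + 1) 1).foldl
      (fun pts x =>
        if ascending then pts ++ [(x, y_min + (x - x_min))]
        else pts ++ [(x, y_max - (x - x_min))]) []
  else []

-- ===== PORT B =====
-- Source B's inner 'seg': n+1 points from (x, y) stepping (dx, dy), built by halving the count.
-- The Python count n is a nonnegative int (abs / ordered difference); it is ported as Nat, and n // 2 as Nat division (exact for n ≥ 0).
def segB (x y dx dy : Int) (n : Nat) : List (Int × Int) :=
  if n = 0 then [(x, y)]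
  else
    -- Python binds h = n // 2; written inline here as n / 2
    segB x y dx dy (n / 2) ++
      segB (x + (n / 2 + 1) * dx) (y + (n / 2 + 1) * dy) dx dy (n - n / 2 - 1)
termination_by n
decreasing_by all_goals omega

def gen_line_points_alt (x1 : Int) (y1 : Int) (x2 : Int) (y2 : Int) (diagonal_line : Bool) : List (Int × Int) :=
  if x1 = x2 then
    segB x1 (min y1 y2) 0 1 (y2 - y1).natAbs
  else if y1 = y2 ∨ diagonal_line = true then
    -- sorted([(x1, y1), (x2, y2)]) on two pairs: lexicographic comparison, then destructure
    match (if x1 < x2 ∨ (x1 = x2 ∧ y1 ≤ y2) then ((x1, y1), (x2, y2)) else ((x2, y2), (x1, y1))) with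
    | ((a, p), (b, q)) =>
      segB a p 1 ((if p < q then 1 else 0) - (if q < p then 1 else 0)) (b - a).toNat
  else []

-- ===== PRECONDITION & SPEC =====
def Spec_gen_line_points (x1 : Int) (y1 : Int) (x2 : Int) (y2 : Int) (diagonal_line : Bool) (out : List (Int × Int)) : Prop := out = gen_line_points_alt x1 y1 x2 y2 diagonal_line
instance (x1 : Int) (y1 : Int) (x2 : Int) (y2 : Int) (diagonal_line : Bool) (out : List (Int × Int)) : Decidable (Spec_gen_line_points x1 y1 x2 y2 diagonal_line out) := by unfold Spec_gen_line_points; infer_instance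

-- ===== CLAIM (what is proved, stated in full; the proofs are below) =====
def Claim_equal_gen_line_points : Prop := ∀ (x1 : Int) (y1 : Int) (x2 : Int) (y2 : Int) (diagonal_line : Bool), Dom_gen_line_points x1 y1 x2 y2 diagonal_line → Spec_gen_line_points x1 y1 x2 y2 diagonal_line (gen_line_points x1 y1 x2 y2 diagonal_line)

-- ===== LEMMAS AND PROOFS =====

-- The divide-and-conquer builder produces exactly the arithmetic-progression point list.
theorem segB_eq (dx dy : Int) : ∀ n x y, segB x y dx dy n =
    (List.range (n + 1)).map (fun i : Nat => (x + (i : Int) * dx, y + (i : Int) * dy)) := by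
  intro n
  induction n using Nat.strong_induction_on with
  | _ n ih =>
    intro x y
    by_cases h0 : n = 0
    · subst h0; simp [segB]
    · rw [segB, if_neg h0, ih (n / 2) (by omega), ih (n - n / 2 - 1) (by omega)]
      have hsplit : n + 1 = (n / 2 + 1) + (n - n / 2) := by omega
      conv_rhs => rw [hsplit, List.range_add, List.map_append, List.map_map]
      have h2 : n - n / 2 - 1 + 1 = n - n / 2 := by omega
      rw [h2]
      congr 1
      apply List.map_congr_left
      intro k _
      simp only [Function.comp_apply]
      push_cast
      rw [Prod.mk.injEq]
      constructor <;> ring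

theorem map_range_ext {f g : Nat → Int × Int} {m n : Nat} (h : m = n)
    (hfg : ∀ k : Nat, f k = g k) :
    List.map f (List.range m) = List.map g (List.range n) := by
  subst h; exact List.map_congr_left (fun k _ => hfg k)

-- The two ports agree on every input.
theorem ports_agree (x1 y1 x2 y2 : Int) (d : Bool) :
    gen_line_points x1 y1 x2 y2 d = gen_line_points_alt x1 y1 x2 y2 d := by
  unfold gen_line_points gen_line_points_alt
  simp only [PySem.List.foldl_append_singleton_eq_map, PySem.List.pyRange_one, List.map_map,
    segB_eq]
  rcases lt_trichotomy x1 x2 with hx | hx | hx <;>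
    rcases lt_trichotomy y1 y2 with hy | hy | hy <;>
      cases d <;>
        simp only [hx, hy, min_def, max_def, if_pos, if_neg, le_refl, le_of_lt,
          lt_irrefl, not_le, beq_iff_eq, Bool.and_eq_true, Bool.or_eq_true] <;>
        (try split_ifs) <;>
        (try simp only [PySem.List.foldl_append_singleton_eq_map, List.map_map, List.nil_append]) <;>
        first
          | rfl
          | (exfalso; first | omega | (simp_all; done))
          | (apply map_range_ext (by omega); intro k; simp; (try omega))

-- ===== VERDICT (by name: the statement is the Claim_ definition above) =====
theorem gen_line_points_spec : Claim_equal_gen_line_points := by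
  intro x1 y1 x2 y2 d _
  unfold Spec_gen_line_points
  exact ports_agree x1 y1 x2 y2 d
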